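-- pv_equiv track=rewrite | github.com/MattMcPartlon/AttnPacker | protein_learning/models/utils/feature_flags.py | get_ss_blocks
-- ===== SOURCE A (Python) =====
-- from typing import List, Tuple, Optional, Dict
--
-- def get_ss_blocks(sec_struc: str) -> Tuple[List[List[int]], List[str]]:
--     """Partition secondary structure into contiguous blocks
--
--     Returns:
--             ss_blocks
--             where ss_blocks[i] = index of residues constituting block i
--             ss_labels
--             where ss_labels[i] = the secondary structure label of residues in block i
--     """
--     ss_blocks, ss_block, block_labels = [], [0], []
--     for i in range(1, len(sec_struc)):
--         if sec_struc[i] == sec_struc[i - 1]: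
--             ss_block.append(i)
--         else:
--             ss_blocks.append(ss_block)
--             block_labels.append(sec_struc[i - 1])
--             ss_block = [i]
--     ss_blocks.append(ss_block)
--     block_labels.append(sec_struc[-1])
--     return ss_blocks, block_labels
-- ===== SOURCE B (Python) =====
-- def get_ss_blocks(sec_struc):
--     n = len(sec_struc)
--     boundaries = ([0]
--                   + [i for i in range(1, n) if sec_struc[i] != sec_struc[i - 1]]
--                   + [n])
--     ss_blocks = [list(range(boundaries[j], boundaries[j + 1]))
--                  for j in range(len(boundaries) - 1)]
--     block_labels = [sec_struc[b] for b in boundaries[:-1]]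
--     return ss_blocks, block_labels
-- ===== Notes on version B (the rewrite author's own statement) =====
-- stated objective: alternative
-- what changed: Replaces A's single-pass append-and-flush state machine with a two-phase boundary computation: first collect the change positions, then materialize blocks as ranges between consecutive boundaries and labels as the character at each block start.
import Mathlib
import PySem

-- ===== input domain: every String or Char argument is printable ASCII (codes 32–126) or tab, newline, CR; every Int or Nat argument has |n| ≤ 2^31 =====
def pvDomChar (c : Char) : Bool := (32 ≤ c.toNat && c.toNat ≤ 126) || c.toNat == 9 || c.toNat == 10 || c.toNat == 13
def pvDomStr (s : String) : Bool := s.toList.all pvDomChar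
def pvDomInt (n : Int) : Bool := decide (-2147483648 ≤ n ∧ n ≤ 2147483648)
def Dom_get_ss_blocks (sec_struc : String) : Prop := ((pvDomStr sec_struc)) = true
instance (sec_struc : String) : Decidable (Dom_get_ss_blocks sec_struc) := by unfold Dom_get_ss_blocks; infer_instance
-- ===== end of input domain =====

-- B replaces A's single-pass append-and-flush state machine with a two-phase
-- boundary computation (collect change positions, then slice); same cost, alternative decomposition.


-- ===== PORT A =====
-- A's loop state: (ss_blocks, ss_block, block_labels)
def ssStep (cs : List Char) (acc : List (List Int) × List Int × List String) (i : Int) :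
    List (List Int) × List Int × List String :=
  if PySem.List.pyGetD cs i ' ' = PySem.List.pyGetD cs (i - 1) ' ' then
    (acc.1, acc.2.1 ++ [i], acc.2.2)
  else
    (acc.1 ++ [acc.2.1], [i], acc.2.2 ++ [String.ofList [PySem.List.pyGetD cs (i - 1) ' ']])

-- literal transliteration of A; sec_struc[-1] via pyGetD is exact only on nonempty input (Pre_)
def get_ss_blocks (sec_struc : String) : List (List Int) × List String :=
  let cs := sec_struc.toList
  let r := (PySem.List.pyRange 1 (cs.length : Int) 1).foldl (ssStep cs) ([], [0], [])
  (r.1 ++ [r.2.1], r.2.2 ++ [String.ofList [PySem.List.pyGetD cs (-1) ' ']])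

-- ===== PORT B =====
def get_ss_blocks_alt (sec_struc : String) : List (List Int) × List String :=
  let cs := sec_struc.toList
  let n : Int := (cs.length : Int)
  let boundaries : List Int :=
    [0] ++ (PySem.List.pyRange 1 n 1).filter
             (fun i => PySem.List.pyGetD cs i ' ' != PySem.List.pyGetD cs (i - 1) ' ')
         ++ [n]
  let ss_blocks : List (List Int) :=
    (PySem.List.pyRange 0 ((boundaries.length : Int) - 1) 1).map
      (fun j => PySem.List.pyRange (PySem.List.pyGetD boundaries j 0)
                                   (PySem.List.pyGetD boundaries (j + 1) 0) 1)
  let block_labels : List String :=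
    (PySem.List.slice boundaries none (some (-1))).map
      (fun b => String.ofList [PySem.List.pyGetD cs b ' '])
  (ss_blocks, block_labels)

-- ===== PRECONDITION & SPEC =====
-- Pre_ excludes only the empty string, on which A raises IndexError (sec_struc[-1]).
def Pre_get_ss_blocks (sec_struc : String) : Prop := sec_struc ≠ ""
instance (sec_struc : String) : Decidable (Pre_get_ss_blocks sec_struc) := by unfold Pre_get_ss_blocks; infer_instance
def pvWitness_get_ss_blocks : String := "HHEEC"

def Spec_get_ss_blocks (sec_struc : String) (out : List (List Int) × List String) : Prop := out = get_ss_blocks_alt sec_struc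
instance (sec_struc : String) (out : List (List Int) × List String) : Decidable (Spec_get_ss_blocks sec_struc out) := by unfold Spec_get_ss_blocks; infer_instance

-- ===== CLAIM (what is proved, stated in full; the proofs are below) =====
def Claim_equal_get_ss_blocks : Prop := ∀ (sec_struc : String), Dom_get_ss_blocks sec_struc → Pre_get_ss_blocks sec_struc → Spec_get_ss_blocks sec_struc (get_ss_blocks sec_struc)

-- ===== LEMMAS AND PROOFS =====

-- interior boundaries among indices 1..k-1
def intB (cs : List Char) (k : Nat) : List Int :=
  (PySem.List.pyRange 1 (k : Int) 1).filter
    (fun i => PySem.List.pyGetD cs i ' ' != PySem.List.pyGetD cs (i - 1) ' ')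

-- consecutive-pairs zip of a list extended at the end
theorem zip_cons_concat (a x : Int) (l : List Int) :
    ((a :: (l ++ [x])).zip (l ++ [x])) = ((a :: l).zip l) ++ [(l.getLastD a, x)] := by
  induction l generalizing a with
  | nil => simp
  | cons b t ih =>
    simp only [List.cons_append, List.zip_cons_cons, List.getLastD_cons]
    exact congrArg (List.cons (a, b)) (by simpa using ih b)

-- map over indexed consecutive pairs = map over zip of tail
theorem map_consec (l : List Int) (f : Int → Int → List Int) :
    (PySem.List.pyRange 0 ((l.length : Int) - 1) 1).map
      (fun j => f (PySem.List.pyGetD l j 0) (PySem.List.pyGetD l (j + 1) 0))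
      = (l.zip l.tail).map (fun p => f p.1 p.2) := by
  rcases l with _ | ⟨h, t⟩
  · simp [PySem.List.pyRange_one_eq_nil]
  · have hlen : (((h :: t).length : Int) - 1) = ((t.length : Nat) : Int) := by
      simp
    rw [hlen, PySem.List.pyRange_zero_natCast, List.map_map]
    apply List.ext_getElem
    · simp
    · intro i hi1 hi2
      have hit : i < t.length := by simpa using hi1
      simp only [List.getElem_map, List.getElem_range, Function.comp]
      have h1 : PySem.List.pyGetD (h :: t) ((i : Nat) : Int) 0 = (h :: t)[i] := by
        rw [PySem.List.pyGetD_natCast]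
        exact List.getD_eq_getElem _ _ (by simp; omega)
      have h2 : PySem.List.pyGetD (h :: t) (((i : Nat) : Int) + 1) 0 = (h :: t)[i + 1] := by
        have : ((i : Nat) : Int) + 1 = (((i + 1 : Nat)) : Int) := by push_cast; ring
        rw [this, PySem.List.pyGetD_natCast]
        exact List.getD_eq_getElem _ _ (by simp; omega)
      rw [h1, h2, List.getElem_zip]
      simp

-- intB extended by one index
theorem intB_succ (cs : List Char) (k : Nat) (hk : 1 ≤ k) :
    intB cs (k + 1) =
      intB cs k ++ (if PySem.List.pyGetD cs (k : Int) ' ' = PySem.List.pyGetD cs ((k : Int) - 1) ' '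
                    then [] else [(k : Int)]) := by
  unfold intB
  rw [show ((k + 1 : Nat) : Int) = (k : Int) + 1 by push_cast; ring,
      PySem.List.pyRange_one_succ_right (by exact_mod_cast hk), List.filter_append,
      List.filter_singleton]
  by_cases h : PySem.List.pyGetD cs (k : Int) ' ' = PySem.List.pyGetD cs ((k : Int) - 1) ' '
  · rw [show (PySem.List.pyGetD cs (k : Int) ' ' != PySem.List.pyGetD cs ((k : Int) - 1) ' ') = false
          from bne_eq_false_iff_eq.mpr h,
        Bool.cond_false, if_pos h]
  · rw [show (PySem.List.pyGetD cs (k : Int) ' ' != PySem.List.pyGetD cs ((k : Int) - 1) ' ') = true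
          from bne_iff_ne.mpr h,
        Bool.cond_true, if_neg h]

-- the fold invariant: state after processing indices 1..k-1
theorem fold_inv (cs : List Char) (k : Nat) (hk : 1 ≤ k) :
    (PySem.List.pyRange 1 (k : Int) 1).foldl (ssStep cs) ([], [0], []) =
      ( ((0 :: intB cs k).zip (intB cs k)).map (fun p => PySem.List.pyRange p.1 p.2 1),
        PySem.List.pyRange ((intB cs k).getLastD 0) (k : Int) 1,
        (0 :: intB cs k).dropLast.map (fun b => String.ofList [PySem.List.pyGetD cs b ' ']) )
    ∧ PySem.List.pyGetD cs ((intB cs k).getLastD 0) ' ' = PySem.List.pyGetD cs ((k : Int) - 1) ' ' := by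
  induction k with
  | zero => omega
  | succ k ih =>
    rcases Nat.lt_or_ge k 1 with hk1 | hk1
    · -- k = 0 : base case k+1 = 1
      have hk0 : k = 0 := by omega
      subst hk0
      have hcast1 : (((0 + 1 : Nat)) : Int) = (1 : Int) := by norm_num
      have hintB : intB cs (0 + 1) = [] := by
        unfold intB
        rw [hcast1, PySem.List.pyRange_one_eq_nil (le_refl 1)]
        rfl
      refine ⟨?_, ?_⟩
      · rw [hintB]
        have h1 : PySem.List.pyRange 1 (((0 + 1 : Nat)) : Int) 1 = [] := by
          rw [hcast1]; exact PySem.List.pyRange_one_eq_nil (le_refl 1)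
        have h2 : PySem.List.pyRange ((([] : List Int)).getLastD 0) (((0 + 1 : Nat)) : Int) 1 = [0] := by
          rw [hcast1]; decide
        rw [h1, h2]
        rfl
      · rw [hintB]
        simp
    · obtain ⟨ihS, ihc⟩ := ih hk1
      have hcast : ((k + 1 : Nat) : Int) = (k : Int) + 1 := by push_cast; ring
      have hstep : (PySem.List.pyRange 1 ((k + 1 : Nat) : Int) 1).foldl (ssStep cs) ([], [0], [])
          = ssStep cs ((PySem.List.pyRange 1 (k : Int) 1).foldl (ssStep cs) ([], [0], [])) (k : Int) := by
        rw [hcast, PySem.List.pyRange_one_succ_right (by exact_mod_cast hk1), List.foldl_append,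
            List.foldl_cons, List.foldl_nil]
      have hlast : ((0 : Int) :: intB cs k).getLast (by simp) = (intB cs k).getLastD 0 :=
        List.getLast_eq_getLastD (by simp)
      have hbound : (intB cs k).getLastD 0 ≤ (k : Int) := by
        rcases (intB cs k).eq_nil_or_concat with hnil | ⟨l', x, hlx⟩
        · rw [hnil]; simp
        · simp only [List.concat_eq_append] at hlx
          rw [hlx, List.getLastD_concat]
          have hx : x ∈ intB cs k := by rw [hlx]; simp
          have := (PySem.List.mem_pyRange_one).1 (List.mem_of_mem_filter (by
            unfold intB at hx; exact hx))
          omega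
      rw [hstep, ihS, intB_succ cs k hk1]
      by_cases h : PySem.List.pyGetD cs (k : Int) ' ' = PySem.List.pyGetD cs ((k : Int) - 1) ' '
      · -- same char: extend current block
        simp only [h, if_true, List.append_nil]
        refine ⟨?_, ?_⟩
        · unfold ssStep
          simp only [h, if_true]
          refine Prod.ext rfl (Prod.ext ?_ rfl)
          simp only
          rw [← PySem.List.pyRange_one_succ_right hbound, hcast]
        · rw [ihc, show ((k + 1 : Nat) : Int) - 1 = (k : Int) by push_cast; ring]
          exact h.symm
      · -- change: close block, open new one at k
        simp only [h, if_false]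
        refine ⟨?_, ?_⟩
        · unfold ssStep
          simp only [h, if_false]
          refine Prod.ext ?_ (Prod.ext ?_ ?_)
          · simp only
            rw [zip_cons_concat, List.map_append]
            rfl
          · simp only [List.getLastD_concat]
            rw [hcast, PySem.List.pyRange_one_singleton]
          · simp only
            rw [show (0 : Int) :: (intB cs k ++ [(k : Int)]) = ((0 : Int) :: intB cs k) ++ [(k : Int)] from rfl,
                List.dropLast_concat]
            conv_rhs => rw [← List.dropLast_concat_getLast (l := (0 : Int) :: intB cs k) (by simp)]
            rw [List.map_append, hlast, List.map_cons, List.map_nil, ihc]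
        · rw [List.getLastD_concat,
              show ((k + 1 : Nat) : Int) - 1 = (k : Int) by push_cast; ring]

-- ===== VERDICT (by name: the statement is the Claim_ definition above) =====
theorem get_ss_blocks_spec : Claim_equal_get_ss_blocks := by
  intro s _ hpre
  unfold Spec_get_ss_blocks get_ss_blocks get_ss_blocks_alt
  have hne : s.toList ≠ [] := fun hc => hpre (String.toList_eq_nil_iff.mp hc)
  set cs := s.toList with hcs
  have hlen : 1 ≤ cs.length := List.length_pos_iff_ne_nil.mpr hne
  obtain ⟨hS, hc⟩ := fold_inv cs cs.length hlen
  simp only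
  rw [hS]
  dsimp only
  have hfold : (PySem.List.pyRange 1 ((cs.length : Nat) : Int) 1).filter
      (fun i => PySem.List.pyGetD cs i ' ' != PySem.List.pyGetD cs (i - 1) ' ') = intB cs cs.length := rfl
  rw [hfold]
  have hbd : ([(0 : Int)] ++ intB cs cs.length ++ [(cs.length : Int)])
      = (0 : Int) :: (intB cs cs.length ++ [(cs.length : Int)]) := by simp
  rw [hbd, map_consec ((0 : Int) :: (intB cs cs.length ++ [(cs.length : Int)]))
        (fun a b => PySem.List.pyRange a b 1)]
  simp only [List.tail_cons]
  rw [zip_cons_concat, List.map_append, PySem.List.slice_to_neg_one,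
      show (0 : Int) :: (intB cs cs.length ++ [(cs.length : Int)])
        = ((0 : Int) :: intB cs cs.length) ++ [(cs.length : Int)] from rfl,
      List.dropLast_concat]
  have hlast : ((0 : Int) :: intB cs cs.length).getLast (by simp)
      = (intB cs cs.length).getLastD 0 := List.getLast_eq_getLastD (by simp)
  have hneg : PySem.List.pyGetD cs (-1) ' ' = PySem.List.pyGetD cs ((cs.length : Int) - 1) ' ' := by
    rw [PySem.List.pyGetD_neg_one cs ' ' hne,
        show ((cs.length : Int) - 1) = (((cs.length - 1 : Nat)) : Int) by omega,
        PySem.List.pyGetD_natCast, List.getD_eq_getElem _ _ (by omega)]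
    exact (List.getLast_eq_getElem hne).trans (by congr 1)
  refine Prod.ext rfl ?_
  simp only
  conv_rhs => rw [← List.dropLast_concat_getLast (l := (0 : Int) :: intB cs cs.length) (by simp)]
  rw [List.map_append, hlast, List.map_cons, List.map_nil, hneg, hc]
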